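-- pv_equiv track=rewrite | github.com/niaid/UMI-pacbio-pipeline | revert_mutations_bam.py | find_inserts
-- ===== SOURCE A (Python) =====
-- def find_inserts(old_cigar, insert_variants_list):
--     """
--     Finds locations of inserts to keep and inserts to remove
--
--     Parameters
--     ----------
--     old_cigar : list of tuples
--         cigar string
--     no_change_dict : dict
--         values given by vcf_file
--     sam_file_ref_start : int
--         offset of reference sequence
--
--     Returns
--     -------
--     good_inserts : list
--         list of inserts to keep
--     bad_inserts : list
--         List of inserts to remove
--     """
--     spot = 0
--     inserts = []
--     for key, count in old_cigar:
--         if key == 1: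
--             inserts += list(range(spot, spot + count))
--             spot += count
--         else:
--             spot += count
--     good_inserts = [x for x in inserts if x in insert_variants_list]
--     bad_inserts = [ x for x in inserts if x not in good_inserts]
--     return good_inserts, bad_inserts
-- ===== SOURCE B (Python) =====
-- def find_inserts(old_cigar, insert_variants_list):
--     spot = 0
--     good_inserts = []
--     bad_inserts = []
--     for key, count in old_cigar:
--         if key == 1:
--             for pos in range(spot, spot + count):
--                 if pos in insert_variants_list:
--                     good_inserts.append(pos)
--                 else:
--                     bad_inserts.append(pos)
--         spot += count
--     return good_inserts, bad_inserts
-- ===== Notes on version B (the rewrite author's own statement) =====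
-- stated objective: simpler
-- what changed: Drops the intermediate inserts list and the two filtering comprehensions: positions are classified into good/bad during a single CIGAR traversal, and the second pass's 'not in good_inserts' scan disappears.
import Mathlib
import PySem

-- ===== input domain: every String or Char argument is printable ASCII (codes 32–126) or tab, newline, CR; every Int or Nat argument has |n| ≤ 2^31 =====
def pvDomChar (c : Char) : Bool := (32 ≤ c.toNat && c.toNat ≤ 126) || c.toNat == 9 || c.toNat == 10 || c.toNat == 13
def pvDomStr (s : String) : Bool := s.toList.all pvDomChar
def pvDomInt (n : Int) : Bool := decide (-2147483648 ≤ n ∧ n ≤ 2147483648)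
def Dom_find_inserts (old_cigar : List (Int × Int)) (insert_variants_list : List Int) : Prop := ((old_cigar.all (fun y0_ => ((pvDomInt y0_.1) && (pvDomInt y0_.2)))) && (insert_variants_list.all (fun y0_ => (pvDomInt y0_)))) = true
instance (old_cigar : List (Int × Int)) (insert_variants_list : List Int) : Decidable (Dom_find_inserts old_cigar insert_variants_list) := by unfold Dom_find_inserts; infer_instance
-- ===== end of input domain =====

-- B classifies insert positions into good/bad during a single CIGAR traversal instead of
-- building the inserts list and filtering it twice (objective: simpler).


-- ===== PORT A =====
def find_inserts (old_cigar : List (Int × Int)) (insert_variants_list : List Int) : List Int × List Int :=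
  let st := old_cigar.foldl
    (fun (s : Int × List Int) kc =>
      if kc.1 == 1 then (s.1 + kc.2, s.2 ++ PySem.List.pyRange s.1 (s.1 + kc.2) 1)
      else (s.1 + kc.2, s.2))
    ((0 : Int), ([] : List Int))
  let inserts := st.2
  let good_inserts := inserts.filter (fun x => insert_variants_list.contains x)
  let bad_inserts := inserts.filter (fun x => !(good_inserts.contains x))
  (good_inserts, bad_inserts)

-- ===== PORT B =====
def find_inserts_alt (old_cigar : List (Int × Int)) (insert_variants_list : List Int) : List Int × List Int :=
  let st := old_cigar.foldl
    (fun (s : Int × List Int × List Int) kc =>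
      if kc.1 == 1 then
        let gb := (PySem.List.pyRange s.1 (s.1 + kc.2) 1).foldl
          (fun (gb : List Int × List Int) pos =>
            if insert_variants_list.contains pos then (gb.1 ++ [pos], gb.2)
            else (gb.1, gb.2 ++ [pos]))
          (s.2.1, s.2.2)
        (s.1 + kc.2, gb.1, gb.2)
      else (s.1 + kc.2, s.2.1, s.2.2))
    ((0 : Int), ([] : List Int), ([] : List Int))
  (st.2.1, st.2.2)

-- ===== PRECONDITION & SPEC =====
def Spec_find_inserts (old_cigar : List (Int × Int)) (insert_variants_list : List Int) (out : List Int × List Int) : Prop := out = find_inserts_alt old_cigar insert_variants_list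
instance (old_cigar : List (Int × Int)) (insert_variants_list : List Int) (out : List Int × List Int) : Decidable (Spec_find_inserts old_cigar insert_variants_list out) := by unfold Spec_find_inserts; infer_instance

-- ===== CLAIM (what is proved, stated in full; the proofs are below) =====
def Claim_equal_find_inserts : Prop := ∀ (old_cigar : List (Int × Int)) (insert_variants_list : List Int), Dom_find_inserts old_cigar insert_variants_list → Spec_find_inserts old_cigar insert_variants_list (find_inserts old_cigar insert_variants_list)

-- ===== LEMMAS AND PROOFS =====

-- B's inner per-position loop appends exactly the two filters of the range.
theorem inner_loop_eq (ivl : List Int) (r : List Int) : ∀ (g b : List Int),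
    r.foldl (fun (gb : List Int × List Int) pos =>
        if ivl.contains pos then (gb.1 ++ [pos], gb.2) else (gb.1, gb.2 ++ [pos])) (g, b)
      = (g ++ r.filter (fun x => ivl.contains x),
         b ++ r.filter (fun x => !(ivl.contains x))) := by
  induction r with
  | nil => intro g b; simp
  | cons x xs ih =>
    intro g b
    rw [List.foldl_cons]
    cases hx : ivl.contains x with
    | true =>
      rw [if_pos rfl, ih]
      have hm : x ∈ ivl := by simpa using hx
      simp [hm]
    | false =>
      rw [if_neg (by simp), ih]
      have hm : x ∉ ivl := by simpa using hx
      simp [hm]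

-- Main invariant: B's fold carries A's inserts list filtered both ways.
theorem main_inv (ivl : List Int) (l : List (Int × Int)) : ∀ (spot : Int) (ins : List Int),
    l.foldl (fun (s : Int × List Int × List Int) kc =>
        if kc.1 == 1 then
          let gb := (PySem.List.pyRange s.1 (s.1 + kc.2) 1).foldl
            (fun (gb : List Int × List Int) pos =>
              if ivl.contains pos then (gb.1 ++ [pos], gb.2) else (gb.1, gb.2 ++ [pos]))
            (s.2.1, s.2.2)
          (s.1 + kc.2, gb.1, gb.2)
        else (s.1 + kc.2, s.2.1, s.2.2))
      (spot, ins.filter (fun x => ivl.contains x), ins.filter (fun x => !(ivl.contains x)))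
    =
    (let a := l.foldl (fun (s : Int × List Int) kc =>
        if kc.1 == 1 then (s.1 + kc.2, s.2 ++ PySem.List.pyRange s.1 (s.1 + kc.2) 1)
        else (s.1 + kc.2, s.2)) (spot, ins)
     (a.1, a.2.filter (fun x => ivl.contains x), a.2.filter (fun x => !(ivl.contains x)))) := by
  induction l with
  | nil => intro spot ins; simp
  | cons kc rest ih =>
    intro spot ins
    by_cases hk : kc.1 == 1
    · simp only [List.foldl_cons, hk, if_true]
      rw [inner_loop_eq ivl (PySem.List.pyRange spot (spot + kc.2) 1)]
      rw [← List.filter_append, ← List.filter_append]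
      exact ih (spot + kc.2) (ins ++ PySem.List.pyRange spot (spot + kc.2) 1)
    · simp only [List.foldl_cons, hk]
      exact ih (spot + kc.2) ins

-- For x in inserts, membership in good_inserts coincides with membership in ivl,
-- so A's second comprehension filters by (non-)membership in ivl.
theorem bad_filter_eq (ivl I : List Int) :
    I.filter (fun x => !((I.filter (fun y => ivl.contains y)).contains x))
      = I.filter (fun x => !(ivl.contains x)) := by
  apply List.filter_congr
  intro x hx
  simp [List.mem_filter, hx]

-- ===== VERDICT (by name: the statement is the Claim_ definition above) =====
theorem find_inserts_spec : Claim_equal_find_inserts := by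
  intro old_cigar ivl _
  unfold Spec_find_inserts find_inserts find_inserts_alt
  have h := main_inv ivl old_cigar 0 []
  simp only [List.filter_nil] at h
  rw [h]
  simp only [Prod.mk.injEq]
  exact ⟨trivial, bad_filter_eq ivl _⟩
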